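-- pv_equiv track=rewrite | github.com/Abdullah1805/uln-secinspector | sovereign_v16.py | reconstruct_chunks
-- ===== SOURCE A (Python) =====
-- import itertools
--
-- def reconstruct_chunks(strings, max_join=3):
--     # Conservative: limited combinations to avoid O(n^2) explosion
--     results = set()
--     for r in range(2, max_join + 1):
--         for combo in itertools.combinations(strings, r):
--             joined = "".join(combo)
--             if 16 < len(joined) < 120:
--                 results.add(joined)
--     return results
-- ===== SOURCE B (Python) =====
-- def reconstruct_chunks(strings, max_join=3):
--     # Incremental level-by-level joining with length pruning instead of
--     # per-r itertools.combinations re-joining from scratch.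
--     results = set()
--     # frontier: (joined, remaining) pairs; 'remaining' holds the strings after
--     # the last one used, so each extension keeps index order (no duplicates).
--     level = []
--     rest = list(strings)
--     while rest:
--         s, rest = rest[0], rest[1:]
--         level.append((s, rest))
--     r = 2
--     while r <= max_join and level:
--         nxt = []
--         for joined, rem in level:
--             t = rem
--             while t:
--                 s, t = t[0], t[1:]
--                 nj = joined + s
--                 nl = len(nj)
--                 if 16 < nl < 120:
--                     results.add(nj)
--                 if nl < 120:
--                     # a join already >= 120 chars can never come back below 120
--                     nxt.append((nj, t))
--         level = nxt
--         r += 1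
--     return results
-- ===== Notes on version B (the rewrite author's own statement) =====
-- stated objective: alternative
-- what changed: B replaces the per-r itertools.combinations re-enumeration by one incremental level-by-level expansion of (join, remaining-suffix) pairs that builds each join by extending the previous level's joins, prunes every partial join whose length already reached 120 (it can never drop back below 120, so it can contribute nothing), and stops early when the frontier empties (e.g. when r exceeds len(strings)).
import Mathlib
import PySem

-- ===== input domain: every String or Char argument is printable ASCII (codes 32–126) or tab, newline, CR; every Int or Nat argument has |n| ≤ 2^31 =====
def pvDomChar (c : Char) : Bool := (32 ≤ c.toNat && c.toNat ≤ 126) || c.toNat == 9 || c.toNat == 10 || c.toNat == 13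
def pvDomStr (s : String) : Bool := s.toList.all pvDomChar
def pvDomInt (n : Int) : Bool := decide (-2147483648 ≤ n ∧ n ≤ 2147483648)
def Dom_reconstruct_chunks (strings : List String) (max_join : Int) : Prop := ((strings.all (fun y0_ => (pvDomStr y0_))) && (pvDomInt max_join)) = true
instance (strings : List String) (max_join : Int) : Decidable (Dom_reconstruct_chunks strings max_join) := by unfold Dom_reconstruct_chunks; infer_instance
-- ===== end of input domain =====

-- B replaces the per-r itertools.combinations enumeration by one incremental
-- level-by-level expansion of (join, remaining) pairs with >=120-length pruning
-- and an early stop on an empty frontier (objective: alternative traversal).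

-- ===== PORT A =====
-- for r in range(2, max_join + 1): for combo in itertools.combinations(strings, r): …
-- r ≥ 2 on every iteration, so r.toNat is exact.
def reconstruct_chunks (strings : List String) (max_join : Int) : List String :=
  (PySem.List.pyRange 2 (max_join + 1) 1).foldl (fun results r =>
    (PySem.List.combinations strings r.toNat).foldl (fun results combo =>
      let joined := PySem.Str.join "" combo
      if 16 < PySem.Str.len joined ∧ PySem.Str.len joined < 120 then
        PySem.Set.add results joined
      else results) results) PySem.Set.empty

-- ===== PORT B =====
-- level = []; while rest: s, rest = rest[0], rest[1:]; level.append((s, rest))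
def rcInit (strings : List String) : List (String × List String) :=
  match strings with
  | [] => []
  | s :: rest => (s, rest) :: rcInit rest

-- the inner 'while t:' loop of Source B, threading (results, nxt)
def rcStep (acc : PySem.Set String × List (String × List String)) (joined : String)
    (t : List String) : PySem.Set String × List (String × List String) :=
  match t with
  | [] => acc
  | s :: t =>
    let nj := joined ++ s          -- Python 'joined + s' (string concatenation)
    let nl := PySem.Str.len nj
    let acc1 := if 16 < nl ∧ nl < 120 then (PySem.Set.add acc.1 nj, acc.2) else acc
    let acc2 := if nl < 120 then (acc1.1, acc1.2 ++ [(nj, t)]) else acc1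
    rcStep acc2 joined t

-- the outer 'while r <= max_join and level:' loop; fuel = (max_join - 1).toNat iterations
def rcLoop (fuel : Nat) (results : PySem.Set String)
    (level : List (String × List String)) : PySem.Set String :=
  match fuel with
  | 0 => results
  | Nat.succ fuel =>
    if level.isEmpty then results
    else
      let p := level.foldl (fun acc q => rcStep acc q.1 q.2) (results, [])
      rcLoop fuel p.1 p.2

def reconstruct_chunks_alt (strings : List String) (max_join : Int) : List String :=
  rcLoop (max_join - 1).toNat PySem.Set.empty (rcInit strings)

-- ===== PRECONDITION & SPEC =====
def Spec_reconstruct_chunks (strings : List String) (max_join : Int) (out : List String) : Prop := out = reconstruct_chunks_alt strings max_join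
instance (strings : List String) (max_join : Int) (out : List String) : Decidable (Spec_reconstruct_chunks strings max_join out) := by unfold Spec_reconstruct_chunks; infer_instance

-- ===== CLAIM (what is proved, stated in full; the proofs are below) =====
def Claim_equal_reconstruct_chunks : Prop := ∀ (strings : List String) (max_join : Int), Dom_reconstruct_chunks strings max_join → Spec_reconstruct_chunks strings max_join (reconstruct_chunks strings max_join)

-- ===== LEMMAS AND PROOFS =====

-- A's conditional set-insertion of one join
def addIf (res : PySem.Set String) (j : String) : PySem.Set String :=
  if 16 < PySem.Str.len j ∧ PySem.Str.len j < 120 then PySem.Set.add res j else res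

-- all one-string extensions of a partial join, in index order, with their rests
def expand (j : String) : List String → List (String × List String)
  | [] => []
  | s :: t => (j ++ s, t) :: expand j t

def fullExp (l : List (String × List String)) : List (String × List String) :=
  l.flatMap (fun p => expand p.1 p.2)

def keep (p : String × List String) : Bool := decide (PySem.Str.len p.1 < 120)

-- k-fold unpruned expansion of a single partial join
def FF : Nat → String → List String → List (String × List String)
  | 0, j, t => [(j, t)]
  | Nat.succ k, j, t => (expand j t).flatMap (fun p => FF k p.1 p.2)

def iterE : Nat → List (String × List String) → List (String × List String)
  | 0, l => l
  | Nat.succ k, l => iterE k (fullExp l)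

-- A's computation re-stated level-wise (no pruning, no early stop)
def Arest : Nat → List (String × List String) → PySem.Set String → PySem.Set String
  | 0, _, res => res
  | Nat.succ n, L, res =>
      Arest n (fullExp L) (((fullExp L).map Prod.fst).foldl addIf res)

theorem joinS_aux (c : List String) (a : String) :
    (c.foldl (· ++ ·) a).toList = a.toList ++ PySem.Chars.join [] (c.map String.toList) := by
  induction c generalizing a with
  | nil => simp [PySem.Chars.join_nil]
  | cons s rest ih =>
    simp only [List.foldl_cons, List.map_cons]
    rw [ih]
    cases rest with
    | nil => simp [PySem.Chars.join_singleton, PySem.Chars.join_nil, String.toList_append]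
    | cons q r =>
      simp only [List.map_cons]
      rw [PySem.Chars.join_cons_cons]
      simp [String.toList_append]

theorem joinS_eq (c : List String) : PySem.Str.join "" c = c.foldl (· ++ ·) "" := by
  apply String.ext
  rw [PySem.Str.toList_join]
  have := joinS_aux c ""
  simp only [String.toList_empty, List.nil_append] at this ⊢
  exact this.symm

theorem len_expand_ge (j : String) (t : List String) :
    ∀ q ∈ expand j t, PySem.Str.len j ≤ PySem.Str.len q.1 := by
  induction t with
  | nil => intro q hq; simp [expand] at hq
  | cons s t ih =>
    intro q hq
    simp only [expand, List.mem_cons] at hq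
    rcases hq with h | h
    · subst h
      have hs : 0 ≤ PySem.Str.len s := by rw [PySem.Str.len_eq]; positivity
      show PySem.Str.len j ≤ PySem.Str.len (j ++ s)
      rw [PySem.Str.len_append]
      omega
    · exact ih q h

theorem filter_expand_nil (j : String) (t : List String)
    (h : ¬ PySem.Str.len j < 120) : (expand j t).filter keep = [] := by
  rw [List.filter_eq_nil_iff]
  intro q hq
  have := len_expand_ge j t q hq
  simp only [keep, decide_eq_true_eq]
  omega

theorem filter_keep_idem (l : List (String × List String)) :
    (l.filter keep).filter keep = l.filter keep := by
  rw [List.filter_filter]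
  apply List.filter_congr
  intro x _
  simp

theorem K_comm (l : List (String × List String)) :
    (fullExp l).filter keep = (fullExp (l.filter keep)).filter keep := by
  induction l with
  | nil => rfl
  | cons p l ih =>
    have hc : fullExp (p :: l) = expand p.1 p.2 ++ fullExp l := rfl
    by_cases hp : keep p = true
    · rw [List.filter_cons_of_pos hp, hc]
      have hc2 : fullExp (p :: l.filter keep) = expand p.1 p.2 ++ fullExp (l.filter keep) := rfl
      rw [hc2, List.filter_append, List.filter_append, ih]
    · rw [List.filter_cons_of_neg hp, hc, List.filter_append, ih,
          filter_expand_nil p.1 p.2 (by simpa [keep] using hp), List.nil_append]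

set_option maxHeartbeats 2000000 in
set_option maxRecDepth 8000 in
theorem rcStep_eq (t : List String) (j : String) : ∀ (res : PySem.Set String)
    (out : List (String × List String)),
    rcStep (res, out) j t =
      (((expand j t).map Prod.fst).foldl addIf res, out ++ (expand j t).filter keep) := by
  induction t with
  | nil => intro res out; simp [expand]; rfl
  | cons s t ih =>
    intro res out
    have hunf : rcStep (res, out) j (s :: t) =
        rcStep (if PySem.Str.len (j ++ s) < 120 then
          ((if 16 < PySem.Str.len (j ++ s) ∧ PySem.Str.len (j ++ s) < 120 then
              (PySem.Set.add res (j ++ s), out) else (res, out)).1,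
           (if 16 < PySem.Str.len (j ++ s) ∧ PySem.Str.len (j ++ s) < 120 then
              (PySem.Set.add res (j ++ s), out) else (res, out)).2 ++ [(j ++ s, t)])
        else (if 16 < PySem.Str.len (j ++ s) ∧ PySem.Str.len (j ++ s) < 120 then
              (PySem.Set.add res (j ++ s), out) else (res, out))) j t := rfl
    rw [hunf]
    by_cases h1 : 16 < PySem.Str.len (j ++ s) ∧ PySem.Str.len (j ++ s) < 120
    · rw [if_pos h1.2, if_pos h1, ih]
      simp only [PySem.Str.len_eq, String.length_append, Nat.cast_add, String.length_toList] at h1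
      simp [expand, keep, addIf, h1]
    · by_cases h2 : PySem.Str.len (j ++ s) < 120
      · rw [if_pos h2, if_neg h1, ih]
        simp only [PySem.Str.len_eq, String.length_append, Nat.cast_add, String.length_toList] at h1 h2
        have h16 : ¬ (16 < (j.length : Int) + (s.length : Int)) := fun hlt => h1 ⟨hlt, h2⟩
        simp [expand, keep, addIf, h16, h2]
      · rw [if_neg h2, if_neg h1, ih]
        simp only [PySem.Str.len_eq, String.length_append, Nat.cast_add, String.length_toList] at h1 h2
        simp [expand, keep, addIf, h2]

theorem foldl_rcStep_eq (level : List (String × List String)) (res : PySem.Set String)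
    (out : List (String × List String)) :
    level.foldl (fun acc q => rcStep acc q.1 q.2) (res, out) =
      (((fullExp level).map Prod.fst).foldl addIf res, out ++ (fullExp level).filter keep) := by
  induction level generalizing res out with
  | nil => simp [fullExp]
  | cons p l ih =>
    rw [List.foldl_cons, rcStep_eq, ih]
    have : fullExp (p :: l) = expand p.1 p.2 ++ fullExp l := rfl
    rw [this, List.map_append, List.foldl_append, List.filter_append, List.append_assoc]

theorem foldl_addIf_filter (l : List String) (res : PySem.Set String) :
    l.foldl addIf res =
      (l.filter (fun j => decide (16 < PySem.Str.len j ∧ PySem.Str.len j < 120))).foldl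
        PySem.Set.add res := by
  unfold addIf
  exact PySem.List.foldl_ite_eq_foldl_filter
      (fun j => 16 < PySem.Str.len j ∧ PySem.Str.len j < 120) PySem.Set.add l res

theorem filter_cond_through_keep (l : List String) :
    l.filter (fun j => decide (16 < PySem.Str.len j ∧ PySem.Str.len j < 120)) =
      (l.filter (fun j => decide (PySem.Str.len j < 120))).filter
        (fun j => decide (16 < PySem.Str.len j ∧ PySem.Str.len j < 120)) := by
  rw [List.filter_filter]
  apply List.filter_congr
  intro x _
  simp

set_option maxRecDepth 8000 in
theorem map_fst_filter (l : List (String × List String)) :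
    ((l.map Prod.fst).filter (fun j => decide (PySem.Str.len j < 120))) =
      (l.filter keep).map Prod.fst := by
  rw [List.filter_map]
  congr 1

theorem emit_congr (L B : List (String × List String)) (res : PySem.Set String)
    (h : B.filter keep = L.filter keep) :
    ((fullExp L).map Prod.fst).foldl addIf res = ((fullExp B).map Prod.fst).foldl addIf res := by
  rw [foldl_addIf_filter, foldl_addIf_filter, filter_cond_through_keep,
      filter_cond_through_keep (((fullExp B).map Prod.fst)), map_fst_filter, map_fst_filter,
      K_comm L, K_comm B, h]

theorem rcLoop_nil (n : Nat) (res : PySem.Set String) : rcLoop n res [] = res := by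
  cases n <;> rfl

theorem main_inv (n : Nat) :
    ∀ (L B : List (String × List String)) (res : PySem.Set String),
      B.filter keep = L.filter keep → Arest n L res = rcLoop n res B := by
  induction n with
  | zero => intro L B res _; rfl
  | succ n ih =>
    intro L B res h
    by_cases hB : B.isEmpty
    · have hBnil : B = [] := List.isEmpty_iff.mp hB
      subst hBnil
      have hLf : (fullExp L).filter keep = [] := by
        rw [K_comm, ← h]
        rfl
      have hstage : ((fullExp L).map Prod.fst).foldl addIf res = res := by
        rw [foldl_addIf_filter, filter_cond_through_keep, map_fst_filter, hLf]
        rfl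
      rw [rcLoop_nil]
      simp only [Arest]
      rw [hstage, ih (fullExp L) [] res (by rw [hLf]; rfl), rcLoop_nil]
    · simp only [Arest, rcLoop]
      rw [if_neg (by simpa using hB)]
      rw [foldl_rcStep_eq B res []]
      simp only [List.nil_append]
      rw [emit_congr L B res h]
      apply ih
      rw [filter_keep_idem, K_comm B, h, ← K_comm]

theorem FF_joins (k : Nat) : ∀ (j : String) (t : List String),
    (FF k j t).map Prod.fst = (PySem.List.combinations t k).map (fun c => c.foldl (· ++ ·) j) := by
  induction k with
  | zero => intro j t; simp [FF, PySem.List.combinations_zero]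
  | succ k ih =>
    intro j t
    induction t with
    | nil => simp [FF, expand, PySem.List.combinations_nil_succ]
    | cons s t iht =>
      show ((expand j (s :: t)).flatMap fun p => FF k p.1 p.2).map Prod.fst = _
      have hsplit : (expand j (s :: t)).flatMap (fun p => FF k p.1 p.2) =
          FF k (j ++ s) t ++ (expand j t).flatMap (fun p => FF k p.1 p.2) := by
        simp [expand]
      rw [hsplit, List.map_append, ih (j ++ s) t]
      have : ((expand j t).flatMap fun p => FF k p.1 p.2) = FF (k + 1) j t := rfl
      rw [this, iht, PySem.List.combinations_cons_succ, List.map_append, List.map_map]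
      rfl

theorem flatMap_FF_succ (k : Nat) (l : List (String × List String)) :
    l.flatMap (fun p => FF (k + 1) p.1 p.2) = (fullExp l).flatMap (fun p => FF k p.1 p.2) := by
  induction l with
  | nil => rfl
  | cons p l ih =>
    have hc : fullExp (p :: l) = expand p.1 p.2 ++ fullExp l := rfl
    rw [List.flatMap_cons, hc, List.flatMap_append, ih]
    rfl

theorem flatMap_FF_eq_iterE (k : Nat) : ∀ (l : List (String × List String)),
    l.flatMap (fun p => FF k p.1 p.2) = iterE k l := by
  induction k with
  | zero => intro l; simp [FF, iterE]
  | succ k ih => intro l; rw [flatMap_FF_succ, ih]; rfl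

theorem iterE_fullExp_comm (k : Nat) : ∀ (l : List (String × List String)),
    iterE k (fullExp l) = fullExp (iterE k l) := by
  induction k with
  | zero => intro l; rfl
  | succ k ih => intro l; exact ih (fullExp l)

theorem iterE_l0_joins (strings : List String) (k : Nat) :
    ((iterE k (expand "" strings)).map Prod.fst) =
      (PySem.List.combinations strings (k + 1)).map (fun c => c.foldl (· ++ ·) "") := by
  have h0 : expand "" strings = fullExp [("", strings)] := by
    simp [fullExp]
  have h1 : iterE k (expand "" strings) = iterE (k + 1) [("", strings)] := by
    rw [h0]; rfl
  rw [h1, ← flatMap_FF_eq_iterE]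
  have : ([(("" : String), strings)]).flatMap (fun p => FF (k + 1) p.1 p.2) =
      FF (k + 1) "" strings := by simp
  rw [this, FF_joins]

-- A's per-r stage, as the port writes it
theorem stage_eq_addIf (strings : List String) (r : Nat) (res : PySem.Set String) :
    (PySem.List.combinations strings r).foldl (fun results combo =>
      let joined := PySem.Str.join "" combo
      if 16 < PySem.Str.len joined ∧ PySem.Str.len joined < 120 then
        PySem.Set.add results joined
      else results) res =
    ((PySem.List.combinations strings r).map (fun c => c.foldl (· ++ ·) "")).foldl addIf res := by
  rw [List.foldl_map]
  apply PySem.List.foldl_congr_mem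
  intro acc c _
  simp only [addIf, joinS_eq]

theorem pyRange_fold_eq_Arest (strings : List String) (n : Nat) :
    ∀ (k : Nat) (res : PySem.Set String),
      (PySem.List.pyRange ((k : Int) + 2) ((k : Int) + 2 + n) 1).foldl (fun results r =>
        (PySem.List.combinations strings r.toNat).foldl (fun results combo =>
          let joined := PySem.Str.join "" combo
          if 16 < PySem.Str.len joined ∧ PySem.Str.len joined < 120 then
            PySem.Set.add results joined
          else results) results) res =
      Arest n (iterE k (expand "" strings)) res := by
  induction n with
  | zero =>
    intro k res
    simp only [Nat.cast_zero, add_zero]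
    have hnil : PySem.List.pyRange ((k : Int) + 2) ((k : Int) + 2) 1 = [] := by
      apply List.eq_nil_of_length_eq_zero
      rw [PySem.List.length_pyRange_one]
      omega
    rw [hnil]
    rfl
  | succ n ih =>
    intro k res
    rw [PySem.List.pyRange_one_cons (by omega)]
    rw [List.foldl_cons]
    have harg : (((k : Int) + 2) + 1) = ((k + 1 : Nat) : Int) + 2 := by push_cast; ring
    have harg2 : ((k : Int) + 2 + (n + 1 : Nat)) = ((k + 1 : Nat) : Int) + 2 + n := by
      push_cast; ring
    rw [harg, harg2, ih (k + 1)]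
    have hnat : ((k : Int) + 2).toNat = k + 2 := by omega
    rw [stage_eq_addIf strings ((k : Int) + 2).toNat, hnat]
    show Arest n (iterE (k+1) (expand "" strings)) _ = Arest n (fullExp (iterE k (expand "" strings))) _
    have hstep : iterE (k + 1) (expand "" strings) = fullExp (iterE k (expand "" strings)) := by
      show iterE k (fullExp _) = _
      exact iterE_fullExp_comm k _
    rw [hstep]
    congr 1
    rw [← hstep, iterE_l0_joins strings (k + 1)]

theorem rcInit_eq_expand (strings : List String) : rcInit strings = expand "" strings := by
  induction strings with
  | nil => rfl
  | cons s t ih => simp [rcInit, expand, ih]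

-- ===== VERDICT (by name: the statement is the Claim_ definition above) =====
theorem reconstruct_chunks_spec : Claim_equal_reconstruct_chunks := by
  intro strings max_join _
  show reconstruct_chunks strings max_join = reconstruct_chunks_alt strings max_join
  unfold reconstruct_chunks reconstruct_chunks_alt
  rw [rcInit_eq_expand]
  by_cases h1 : 1 ≤ max_join
  · have e1 : ((0 : Nat) : Int) + 2 = 2 := by norm_num
    have e2 : ((0 : Nat) : Int) + 2 + (((max_join - 1).toNat : Nat) : Int) = max_join + 1 := by
      push_cast; omega
    rw [← e1, ← e2, pyRange_fold_eq_Arest strings ((max_join - 1).toNat) 0]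
    exact main_inv _ _ _ _ rfl
  · have hr : PySem.List.pyRange 2 (max_join + 1) 1 = [] := by
      apply List.eq_nil_of_length_eq_zero
      rw [PySem.List.length_pyRange_one]
      omega
    have hfuel : (max_join - 1).toNat = 0 := by omega
    rw [hr, hfuel]
    rfl
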